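-- pv_equiv track=rewrite | github.com/emmakofod/itsi | exercises/mandatory1_part1/svarfil.py | answer33
-- ===== SOURCE A (Python) =====
-- def answer33(data):
--     """Question 33: ServiceDesk calls you and tells you they gave you an outdated legend for the log data.
-- It was from before KEA realised that having negative room numbers doesn't make sense.
-- That means the room numbers wrap back around. For example if you are by room 0 and you move left (<), you will be by room 100 and vice versa.
-- Furthermore the legend states that if log entries are repeated, they increment in value.
-- For example if you see >>>, the first ">" is 1, the next ">" is 2, and the last ">" is 3, totalling 6 rooms moved.
-- This incremenation resets if the current log entry differs from the previous entry."""
--     floor = 0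
--     room = 0
--     incr = 1
--     prev_char = None
--
--     for char in data:
--         if char == prev_char:
--             incr += 1
--         else:
--             incr = 1
--
--         if char == "^":
--             floor += incr  # Floors DON'T wrap
--         elif char == "v":
--             floor -= incr  # Floors can go negative
--         elif char == "<":
--             room = (room - incr) % 101  # ONLY rooms wrap
--         elif char == ">":
--             room = (room + incr) % 101  # ONLY rooms wrap
--
--         prev_char = char
--
--     return (floor, room)
-- ===== SOURCE B (Python) =====
-- def answer33(data):
--     """Run-length re-implementation: split the log into maximal runs of one
--     character, add the closed-form triangular total k*(k+1)//2 per run."""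
--     floor = 0
--     room = 0
--     n = len(data)
--     i = 0
--     while i < n:
--         ch = data[i]
--         j = i
--         while j < n and data[j] == ch:
--             j += 1
--         k = j - i
--         t = k * (k + 1) // 2
--         if ch == "^":
--             floor += t
--         elif ch == "v":
--             floor -= t
--         elif ch == "<":
--             room = (room - t) % 101
--         elif ch == ">":
--             room = (room + t) % 101
--         i = j
--     return (floor, room)
-- ===== Notes on version B (the rewrite author's own statement) =====
-- stated objective: alternative
-- what changed: Replaces the per-character counter simulation by a run-length scan: each maximal run of k identical characters contributes the closed-form triangular total k*(k+1)//2 in one dispatch, relying on mod-101 commuting with addition.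
import Mathlib
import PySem

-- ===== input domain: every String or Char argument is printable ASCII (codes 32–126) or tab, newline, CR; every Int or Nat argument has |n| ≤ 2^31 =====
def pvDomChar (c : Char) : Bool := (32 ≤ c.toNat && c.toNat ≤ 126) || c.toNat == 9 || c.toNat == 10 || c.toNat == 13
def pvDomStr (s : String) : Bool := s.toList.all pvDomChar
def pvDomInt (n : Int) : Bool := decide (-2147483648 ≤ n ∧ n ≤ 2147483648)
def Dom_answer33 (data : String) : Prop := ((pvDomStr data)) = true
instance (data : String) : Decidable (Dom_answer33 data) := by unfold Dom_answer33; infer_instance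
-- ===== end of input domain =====

-- B replaces A's per-character counter simulation by a run-length scan with the
-- closed-form triangular total k*(k+1)//2 per maximal run (objective: alternative algorithm).

-- ===== PORT A =====
-- literal transliteration of A: one fold over the characters carrying
-- (floor, room, incr, prev_char)
def answer33Step (st : Int × Int × Int × Option Char) (c : Char) : Int × Int × Int × Option Char :=
  let incr : Int := if some c = st.2.2.2 then st.2.2.1 + 1 else 1
  if c = '^' then (st.1 + incr, st.2.1, incr, some c)
  else if c = 'v' then (st.1 - incr, st.2.1, incr, some c)
  else if c = '<' then (st.1, PySem.Int.mod (st.2.1 - incr) 101, incr, some c)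
  else if c = '>' then (st.1, PySem.Int.mod (st.2.1 + incr) 101, incr, some c)
  else (st.1, st.2.1, incr, some c)

def answer33 (data : String) : Int × Int :=
  let st := data.toList.foldl answer33Step (0, 0, 1, none)
  (st.1, st.2.1)

-- ===== PORT B =====
-- literal transliteration of B (Source B): scan maximal runs of one character;
-- the inner `while j < n and data[j] == ch` scan is the takeWhile/dropWhile split
def answer33Runs : List Char → Int → Int → Int × Int
  | [], floor, room => (floor, room)
  | c :: rest, floor, room =>
    let k : Int := 1 + (rest.takeWhile (fun d => d == c)).length
    let t : Int := PySem.Int.floordiv (k * (k + 1)) 2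
    let rest' := rest.dropWhile (fun d => d == c)
    if c = '^' then answer33Runs rest' (floor + t) room
    else if c = 'v' then answer33Runs rest' (floor - t) room
    else if c = '<' then answer33Runs rest' floor (PySem.Int.mod (room - t) 101)
    else if c = '>' then answer33Runs rest' floor (PySem.Int.mod (room + t) 101)
    else answer33Runs rest' floor room
termination_by l => l.length
decreasing_by all_goals
  exact Nat.lt_succ_of_le (List.length_dropWhile_le _ rest)

def answer33_alt (data : String) : Int × Int :=
  answer33Runs data.toList 0 0

-- ===== PRECONDITION & SPEC =====
def Spec_answer33 (data : String) (out : Int × Int) : Prop := out = answer33_alt data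
instance (data : String) (out : Int × Int) : Decidable (Spec_answer33 data out) := by unfold Spec_answer33; infer_instance

-- ===== CLAIM (what is proved, stated in full; the proofs are below) =====
def Claim_equal_answer33 : Prop := ∀ (data : String), Dom_answer33 data → Spec_answer33 data (answer33 data)

-- ===== LEMMAS AND PROOFS =====

-- floor update of one movement char / one run, as a function of the total t
def moveF (c : Char) (f t : Int) : Int :=
  if c = '^' then f + t else if c = 'v' then f - t else f

-- room update, as a function of the total t
def moveR (c : Char) (r t : Int) : Int :=
  if c = '<' then PySem.Int.mod (r - t) 101
  else if c = '>' then PySem.Int.mod (r + t) 101 else r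

-- total increment contributed by m further chars of a run, entered with counter i
def sumIncr : Nat → Int → Int
  | 0, _ => 0
  | m + 1, i => (i + 1) + sumIncr m (i + 1)

lemma moveR_mod (c : Char) (r t : Int) :
    (c = '<' ∨ c = '>') → PySem.Int.mod (moveR c r t) 101 = moveR c r t := by
  rintro (h | h) <;> simp [moveR, h]

lemma moveF_zero (c : Char) (f : Int) : moveF c f 0 = f := by
  unfold moveF; split_ifs <;> ring

lemma moveR_zero (c : Char) (r : Int)
    (h : (c = '<' ∨ c = '>') → PySem.Int.mod r 101 = r) : moveR c r 0 = r := by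
  unfold moveR
  split_ifs with h1 h2
  · rw [sub_zero]; exact h (Or.inl h1)
  · rw [add_zero]; exact h (Or.inr h2)
  · rfl

lemma moveF_moveF (c : Char) (f a b : Int) :
    moveF c (moveF c f a) b = moveF c f (a + b) := by
  unfold moveF; split_ifs <;> ring

lemma moveR_moveR (c : Char) (r a b : Int) :
    moveR c (moveR c r a) b = moveR c r (a + b) := by
  unfold moveR
  split_ifs with h1 h2
  · simp only [PySem.Int.mod_eq_emod_of_pos (show (0:Int) < 101 by norm_num)]
    omega
  · simp only [PySem.Int.mod_eq_emod_of_pos (show (0:Int) < 101 by norm_num)]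
    omega
  · rfl

lemma step_eq (f r i : Int) (p : Option Char) (c : Char) :
    answer33Step (f, r, i, p) c =
      (moveF c f (if some c = p then i + 1 else 1),
       moveR c r (if some c = p then i + 1 else 1),
       (if some c = p then i + 1 else 1), some c) := by
  unfold answer33Step moveF moveR
  split_ifs <;> simp_all

lemma fold_repl (c : Char) (m : Nat) : ∀ (f r i : Int),
    ((c = '<' ∨ c = '>') → PySem.Int.mod r 101 = r) →
    List.foldl answer33Step (f, r, i, some c) (List.replicate m c) =
      (moveF c f (sumIncr m i), moveR c r (sumIncr m i), i + m, some c) := by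
  induction m with
  | zero =>
    intro f r i h
    simp only [List.replicate, List.foldl_nil, sumIncr, moveF_zero, moveR_zero c r h,
      Nat.cast_zero, add_zero]
  | succ m ih =>
    intro f r i h
    rw [List.replicate_succ, List.foldl_cons, step_eq]
    simp only [if_true]
    rw [ih (moveF c f (i + 1)) (moveR c r (i + 1)) (i + 1) (moveR_mod c r (i + 1))]
    rw [moveF_moveF, moveR_moveR]
    have h1 : sumIncr (m + 1) i = (i + 1) + sumIncr m (i + 1) := rfl
    have h2 : (i + 1) + (m : Int) = i + ((m : Nat) + 1 : Nat) := by push_cast; ring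
    rw [h1, h2]

lemma sumIncr_two (m : Nat) : ∀ i : Int, 2 * sumIncr m i = m * (2 * i + m + 1) := by
  induction m with
  | zero => intro i; simp [sumIncr]
  | succ m ih =>
    intro i
    have h := ih (i + 1)
    unfold sumIncr
    push_cast
    push_cast at h
    linarith

lemma tri_eq (m : Nat) :
    PySem.Int.floordiv ((1 + (m : Int)) * ((1 + (m : Int)) + 1)) 2 = 1 + sumIncr m 1 := by
  have h2 : (1 + (m : Int)) * ((1 + (m : Int)) + 1) = 2 * (1 + sumIncr m 1) := by
    have h := sumIncr_two m 1
    nlinarith [h]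
  rw [PySem.Int.floordiv_eq_ediv_of_pos (show (0:Int) < 2 by norm_num), h2]
  omega

lemma dropWhile_head_not (p : Char → Bool) : ∀ (l : List Char) (x : Char) (xs : List Char),
    l.dropWhile p = x :: xs → ¬ p x := by
  intro l
  induction l with
  | nil => intro x xs h; simp [List.dropWhile] at h
  | cons a as ih =>
    intro x xs h
    by_cases hp : p a
    · rw [List.dropWhile_cons_of_pos hp] at h; exact ih x xs h
    · rw [List.dropWhile_cons_of_neg hp] at h
      injection h with h1 _
      subst h1
      exact hp

lemma main_lemma : ∀ (n : Nat) (l : List Char), l.length ≤ n →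
    ∀ (f r i : Int) (p : Option Char),
    (∀ c, l.head? = some c → p ≠ some c) →
    ((List.foldl answer33Step (f, r, i, p) l).1,
     (List.foldl answer33Step (f, r, i, p) l).2.1) = answer33Runs l f r := by
  intro n
  induction n with
  | zero =>
    intro l hl f r i p _
    have : l = [] := List.eq_nil_of_length_eq_zero (Nat.le_zero.mp hl)
    subst this
    simp [answer33Runs]
  | succ n ih =>
    intro l hl f r i p hp
    cases l with
    | nil => simp [answer33Runs]
    | cons c rest =>
      have hpc : ¬ (some c = p) := fun h => hp c rfl h.symm
      rw [List.foldl_cons, step_eq]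
      simp only [if_neg hpc]
      obtain ⟨m, hrep⟩ : ∃ m, rest.takeWhile (fun d => d == c) = List.replicate m c :=
        ⟨(rest.takeWhile (fun d => d == c)).length, by
          apply List.eq_replicate_of_mem
          intro b hb
          have hpb : (fun d => d == c) b = true :=
            List.mem_takeWhile_imp (p := fun d => d == c) (l := rest) hb
          exact eq_of_beq hpb⟩
      have hlen_tw : (rest.takeWhile (fun d => d == c)).length = m := by
        rw [hrep]; simp
      have hhead : ∀ c', (rest.dropWhile (fun d => d == c)).head? = some c' →
          some c ≠ some c' := by
        intro c' hc' heq
        have hcc : c = c' := by injection heq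
        cases hdwc : rest.dropWhile (fun d => d == c) with
        | nil => rw [hdwc] at hc'; exact absurd hc' (by simp)
        | cons x xs =>
          rw [hdwc] at hc'
          have hxc : x = c' := by simpa using hc'
          have := dropWhile_head_not (fun d => d == c) rest x xs hdwc
          apply this
          simp [hxc, ← hcc]
      have hlen : (rest.dropWhile (fun d => d == c)).length ≤ n := by
        have h1 := List.length_dropWhile_le (fun d => d == c) rest
        have h2 : rest.length ≤ n := by simpa using hl
        omega
      conv_lhs => rw [← List.takeWhile_append_dropWhile (p := fun d => d == c) (l := rest)]
      rw [List.foldl_append, hrep]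
      rw [fold_repl c m (moveF c f 1) (moveR c r 1) 1 (moveR_mod c r 1)]
      rw [moveF_moveF, moveR_moveR]
      rw [ih (rest.dropWhile (fun d => d == c)) hlen _ _ _ _ hhead]
      conv_rhs => rw [answer33Runs]
      simp only [hlen_tw, tri_eq]
      unfold moveF moveR
      split_ifs <;> first | rfl | (exfalso; simp_all)

-- ===== VERDICT (by name: the statement is the Claim_ definition above) =====
theorem answer33_spec : Claim_equal_answer33 := by
  intro data _
  unfold Spec_answer33 answer33 answer33_alt
  exact main_lemma data.toList.length data.toList le_rfl 0 0 1 none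
    (fun c _ h => by cases h)
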